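-- pv_equiv track=rewrite | github.com/theodoredev308/grail-real | grail/trainer/checkpoint_publisher.py | _parse_checkpoint_inventory
-- ===== SOURCE A (Python) =====
-- def _parse_checkpoint_inventory(keys: list[str]) -> tuple[list[int], list[int], list[int]]:
--     """Parse checkpoint keys into checkpoint inventory lists.
--
--     Args:
--         keys: List of S3 keys from checkpoint prefix
--
--     Returns:
--         Tuple of (all_windows, full_windows, delta_windows), each sorted descending (newest first)
--     """
--     delta_windows_set: set[int] = set()
--     all_windows: set[int] = set()
--
--     for key in keys:
--         try:
--             parts = key.split("/")
--             if len(parts) >= 3 and parts[2].startswith("checkpoint-"):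
--                 window = int(parts[2].split("-", 1)[1])
--                 all_windows.add(window)
--                 if len(parts) >= 4 and parts[3] == "DELTA":
--                     delta_windows_set.add(window)
--         except (IndexError, ValueError):
--             continue
--
--     all_windows_sorted = sorted(all_windows, reverse=True)
--     full_windows_sorted = sorted(all_windows - delta_windows_set, reverse=True)
--     delta_windows_sorted = sorted(delta_windows_set, reverse=True)
--     return all_windows_sorted, full_windows_sorted, delta_windows_sorted
-- ===== SOURCE B (Python) =====
-- def _insert_record(inv, window, is_delta):
--     """Insert into a descending-sorted unique (window, has_delta) list, OR-ing the flag on a repeat."""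
--     if not inv:
--         return [(window, is_delta)]
--     x, f = inv[0]
--     if window < x:
--         return [inv[0]] + _insert_record(inv[1:], window, is_delta)
--     if window == x:
--         return [(window, f or is_delta)] + inv[1:]
--     return [(window, is_delta)] + inv
--
--
-- def _parse_checkpoint_inventory(keys):
--     inv = []  # descending-sorted, unique windows, each with its accumulated DELTA flag
--     for key in keys:
--         parts = key.split("/")
--         if len(parts) < 3 or not parts[2].startswith("checkpoint-"):
--             continue
--         try:
--             window = int(parts[2].split("-", 1)[1])
--         except ValueError:
--             continue
--         inv = _insert_record(inv, window, len(parts) >= 4 and parts[3] == "DELTA")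
--     return ([w for w, _ in inv],
--             [w for w, d in inv if not d],
--             [w for w, d in inv if d])
-- ===== Notes on version B (the rewrite author's own statement) =====
-- stated objective: alternative
-- what changed: A collects two unordered sets in one pass and then runs three descending sorts (all, set-difference, delta); B maintains a single descending-sorted unique association list of (window, has_delta) by ordered insertion with flag-merging during the pass, so no sets and no final sort are needed - the three lists are read off the one sorted structure.
import Mathlib
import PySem

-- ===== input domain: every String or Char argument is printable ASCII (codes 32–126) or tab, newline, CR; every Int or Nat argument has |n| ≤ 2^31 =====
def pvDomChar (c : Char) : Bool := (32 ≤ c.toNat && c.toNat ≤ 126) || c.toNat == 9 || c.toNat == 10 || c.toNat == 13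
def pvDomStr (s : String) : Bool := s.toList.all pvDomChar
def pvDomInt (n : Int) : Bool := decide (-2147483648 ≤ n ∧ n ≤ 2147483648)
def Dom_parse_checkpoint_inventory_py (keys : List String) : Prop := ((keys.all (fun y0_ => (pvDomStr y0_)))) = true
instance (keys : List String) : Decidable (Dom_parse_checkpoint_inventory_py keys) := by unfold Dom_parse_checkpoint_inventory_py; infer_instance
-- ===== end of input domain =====

-- B replaces A's two unordered sets + three final sorts by ordered insertion into ONE
-- descending-sorted unique (window, has_delta) association list, from which the three
-- result lists are read off directly (no sets, no final sort).

-- ===== PORT A =====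
-- one iteration of A's loop over keys (IndexError/ValueError branches return the state unchanged = 'continue')
def pvAStep (st : PySem.Set Int × PySem.Set Int) (key : String) : PySem.Set Int × PySem.Set Int :=
  let parts := (PySem.Str.split? key "/").getD []
  if 3 ≤ parts.length && PySem.Str.startswith ((PySem.List.pyGet? parts 2).getD "") "checkpoint-" then
    match PySem.List.pyGet? ((PySem.Str.splitMax? ((PySem.List.pyGet? parts 2).getD "") "-" 1).getD []) 1 with
    | none => st          -- IndexError, caught → continue
    | some numStr =>
      match PySem.Int.ofStr? numStr with
      | none => st        -- ValueError, caught → continue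
      | some window =>
        (PySem.Set.add st.1 window,
         if 4 ≤ parts.length && decide (((PySem.List.pyGet? parts 3).getD "") = "DELTA")
         then PySem.Set.add st.2 window else st.2)
  else st

def parse_checkpoint_inventory_py (keys : List String) : List Int × List Int × List Int :=
  let st := keys.foldl pvAStep (PySem.Set.empty, PySem.Set.empty)
  (PySem.List.sorted st.1 (fun x => x) true,
   PySem.List.sorted (PySem.Set.diff st.1 st.2) (fun x => x) true,
   PySem.List.sorted st.2 (fun x => x) true)

-- ===== PORT B =====
-- _insert_record from Source B: insertion into the descending-sorted unique list, OR-ing the flag on a repeat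
def pvInsertRecord : List (Int × Bool) → Int → Bool → List (Int × Bool)
  | [], w, d => [(w, d)]
  | (x, f) :: rest, w, d =>
      if w < x then (x, f) :: pvInsertRecord rest w d
      else if w = x then (w, f || d) :: rest
      else (w, d) :: (x, f) :: rest

def parse_checkpoint_inventory_py_alt (keys : List String) : List Int × List Int × List Int :=
  let inv := keys.foldl (fun inv key =>
      let parts := (PySem.Str.split? key "/").getD []
      if parts.length < 3 || !PySem.Str.startswith ((PySem.List.pyGet? parts 2).getD "") "checkpoint-" then inv
      else
        match PySem.List.pyGet? ((PySem.Str.splitMax? ((PySem.List.pyGet? parts 2).getD "") "-" 1).getD []) 1 with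
        | none => inv     -- unreachable (the name starts with "checkpoint-")
        | some numStr =>
          match PySem.Int.ofStr? numStr with
          | none => inv   -- ValueError, caught → continue
          | some window =>
            pvInsertRecord inv window
              (4 ≤ parts.length && decide (((PySem.List.pyGet? parts 3).getD "") = "DELTA")))
    []
  (inv.map Prod.fst,
   (inv.filter (fun p => !p.2)).map Prod.fst,
   (inv.filter (fun p => p.2)).map Prod.fst)

-- ===== PRECONDITION & SPEC =====
def Spec_parse_checkpoint_inventory_py (keys : List String) (out : List Int × List Int × List Int) : Prop := out = parse_checkpoint_inventory_py_alt keys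
instance (keys : List String) (out : List Int × List Int × List Int) : Decidable (Spec_parse_checkpoint_inventory_py keys out) := by unfold Spec_parse_checkpoint_inventory_py; infer_instance

-- ===== CLAIM =====
def Claim_equal_parse_checkpoint_inventory_py : Prop := ∀ (keys : List String), Dom_parse_checkpoint_inventory_py keys → Spec_parse_checkpoint_inventory_py keys (parse_checkpoint_inventory_py keys)

-- ===== LEMMAS AND PROOFS =====

-- proof-side shared parse of one key
def pvParse? (key : String) : Option (Int × Bool) :=
  let parts := (PySem.Str.split? key "/").getD []
  if 3 ≤ parts.length && PySem.Str.startswith ((PySem.List.pyGet? parts 2).getD "") "checkpoint-" then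
    match PySem.List.pyGet? ((PySem.Str.splitMax? ((PySem.List.pyGet? parts 2).getD "") "-" 1).getD []) 1 with
    | none => none
    | some numStr =>
      match PySem.Int.ofStr? numStr with
      | none => none
      | some window =>
        some (window, 4 ≤ parts.length && decide (((PySem.List.pyGet? parts 3).getD "") = "DELTA"))
  else none

lemma pvAStep_eq (st : PySem.Set Int × PySem.Set Int) (key : String) :
    pvAStep st key = match pvParse? key with
      | none => st
      | some (w, d) => (PySem.Set.add st.1 w, if d then PySem.Set.add st.2 w else st.2) := by
  simp only [pvAStep, pvParse?]
  split
  · split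
    · rfl
    · split <;> rfl
  · rfl

-- proof-side name for B's foldl lambda
def pvBStep (inv : List (Int × Bool)) (key : String) : List (Int × Bool) :=
  let parts := (PySem.Str.split? key "/").getD []
  if parts.length < 3 || !PySem.Str.startswith ((PySem.List.pyGet? parts 2).getD "") "checkpoint-" then inv
  else
    match PySem.List.pyGet? ((PySem.Str.splitMax? ((PySem.List.pyGet? parts 2).getD "") "-" 1).getD []) 1 with
    | none => inv
    | some numStr =>
      match PySem.Int.ofStr? numStr with
      | none => inv
      | some window =>
        pvInsertRecord inv window
          (4 ≤ parts.length && decide (((PySem.List.pyGet? parts 3).getD "") = "DELTA"))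

lemma pvBStep_eq (inv : List (Int × Bool)) (key : String) :
    pvBStep inv key = match pvParse? key with
      | none => inv
      | some (w, d) => pvInsertRecord inv w d := by
  simp only [pvBStep, pvParse?]
  have hb : ∀ (n : Nat) (b : Bool), (decide (n < 3) || !b) = !(decide (3 ≤ n) && b) := by
    intro n b
    cases b <;> by_cases h : 3 ≤ n <;>
      first
        | (simp [h]; omega)
        | simp [h]
  rw [hb]
  split
  · next h =>
    rw [Bool.not_eq_true'] at h
    simp only [h, Bool.false_eq_true, if_false]
  · next h =>
    rw [Bool.not_eq_true', Bool.not_eq_false] at h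
    simp only [h, if_true]
    split
    · rfl
    · split <;> rfl

-- fst-membership of an insertion result
lemma mem_fst_insert (L : List (Int × Bool)) (w : Int) (d : Bool) :
    ∀ y ∈ (pvInsertRecord L w d).map Prod.fst, y = w ∨ y ∈ L.map Prod.fst := by
  induction L generalizing d with
  | nil => intro y hy; simp [pvInsertRecord] at hy; exact Or.inl hy
  | cons p rest ih =>
    obtain ⟨x, f⟩ := p
    intro y hy
    simp only [pvInsertRecord] at hy
    split_ifs at hy with h1 h2
    · simp only [List.map_cons, List.mem_cons] at hy ⊢
      rcases hy with hy | hy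
      · exact Or.inr (Or.inl hy)
      · rcases ih d y hy with hy | hy
        · exact Or.inl hy
        · exact Or.inr (Or.inr hy)
    · simp only [List.map_cons, List.mem_cons] at hy ⊢
      rcases hy with hy | hy
      · exact Or.inl hy
      · exact Or.inr (Or.inr hy)
    · simp only [List.map_cons, List.mem_cons] at hy ⊢
      rcases hy with hy | hy
      · exact Or.inl hy
      · exact Or.inr hy

-- sortedness is preserved by insertion
lemma pairwise_insert (L : List (Int × Bool)) (w : Int) (d : Bool)
    (h : L.Pairwise (fun a b => b.1 < a.1)) :
    (pvInsertRecord L w d).Pairwise (fun a b => b.1 < a.1) := by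
  induction L generalizing d with
  | nil => simp [pvInsertRecord]
  | cons p rest ih =>
    obtain ⟨x, f⟩ := p
    rw [List.pairwise_cons] at h
    obtain ⟨hhead, htail⟩ := h
    simp only [pvInsertRecord]
    split_ifs with h1 h2
    · rw [List.pairwise_cons]
      refine ⟨?_, ih d htail⟩
      intro q hq
      rcases mem_fst_insert rest w d q.1 (List.mem_map_of_mem hq) with h | h
      · simpa [h] using h1
      · obtain ⟨q', hq', hq1⟩ := List.mem_map.mp h
        exact hq1 ▸ hhead q' hq'
    · rw [List.pairwise_cons]
      exact ⟨fun q hq => by simpa [h2] using hhead q hq, htail⟩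
    · rw [List.pairwise_cons]
      constructor
      · intro q hq
        rcases List.mem_cons.mp hq with hq | hq
        · subst hq; omega
        · have := hhead q hq; omega
      · exact List.pairwise_cons.mpr ⟨hhead, htail⟩

-- insertion of an already-present window leaves the window list unchanged
lemma fst_insert_of_mem (L : List (Int × Bool)) (w : Int) (d : Bool)
    (hpw : L.Pairwise (fun a b => b.1 < a.1)) (hw : w ∈ L.map Prod.fst) :
    (pvInsertRecord L w d).map Prod.fst = L.map Prod.fst := by
  induction L generalizing d with
  | nil => simp at hw
  | cons p rest ih =>
    obtain ⟨x, f⟩ := p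
    rw [List.pairwise_cons] at hpw
    simp only [List.map_cons, List.mem_cons] at hw
    simp only [pvInsertRecord]
    split_ifs with h1 h2
    · have hw' : w ∈ rest.map Prod.fst := by
        rcases hw with hw | hw
        · omega
        · exact hw
      simp [ih d hpw.2 hw']
    · simp [h2]
    · exfalso
      rcases hw with hw | hw
      · omega
      · obtain ⟨q, hq, hq1⟩ := List.mem_map.mp hw
        have := hpw.1 q hq; omega

-- insertion of a fresh window adds exactly it
lemma fst_insert_of_not_mem (L : List (Int × Bool)) (w : Int) (d : Bool)
    (hw : w ∉ L.map Prod.fst) :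
    ((pvInsertRecord L w d).map Prod.fst).Perm (w :: L.map Prod.fst) := by
  induction L generalizing d with
  | nil => simp [pvInsertRecord]
  | cons p rest ih =>
    obtain ⟨x, f⟩ := p
    simp only [List.map_cons, List.mem_cons, not_or] at hw
    simp only [pvInsertRecord]
    split_ifs with h1 h2
    · simp only [List.map_cons]
      exact ((ih d hw.2).cons x).trans (List.Perm.swap w x _)
    · exact absurd h2 hw.1
    · simp

-- the flag stored with each window tracks membership in the delta set
lemma flag_insert (L : List (Int × Bool)) (w : Int) (d : Bool) (st2 : PySem.Set Int)
    (hpw : L.Pairwise (fun a b => b.1 < a.1))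
    (hfresh : w ∉ L.map Prod.fst → PySem.Set.contains st2 w = false)
    (hfl : ∀ p ∈ L, p.2 = PySem.Set.contains st2 p.1) :
    ∀ p ∈ pvInsertRecord L w d, p.2 = (PySem.Set.contains st2 p.1 || (d && decide (p.1 = w))) := by
  induction L generalizing d with
  | nil =>
    intro p hp
    simp only [pvInsertRecord, List.mem_singleton] at hp
    subst hp
    rw [hfresh (by simp)]
    simp
  | cons q rest ih =>
    obtain ⟨x, f⟩ := q
    rw [List.pairwise_cons] at hpw
    intro p hp
    simp only [pvInsertRecord] at hp
    split_ifs at hp with h1 h2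
    · rcases List.mem_cons.mp hp with hp | hp
      · subst hp
        have hx : ¬ ((x : Int) = w) := by omega
        have hf := hfl (x, f) (by simp)
        simp only [] at hf
        rw [hf]
        simp [hx]
      · refine ih d hpw.2 ?_ (fun r hr => hfl r (List.mem_cons_of_mem _ hr)) p hp
        intro hnm
        apply hfresh
        simp only [List.map_cons, List.mem_cons, not_or]
        exact ⟨by omega, hnm⟩
    · rcases List.mem_cons.mp hp with hp | hp
      · subst hp
        have hfx : f = PySem.Set.contains st2 w := by
          have := hfl (x, f) (by simp)
          simpa [h2] using this
        rw [hfx]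
        cases d <;> simp
      · have h3 : ¬ (p.1 = w) := by
          have := hpw.1 p hp; omega
        simp [h3, hfl p (List.mem_cons_of_mem _ hp)]
    · rcases List.mem_cons.mp hp with hp | hp
      · subst hp
        have hcw : PySem.Set.contains st2 w = false := by
          apply hfresh
          intro hm
          rcases List.mem_map.mp hm with ⟨r, hr, hr1⟩
          rcases List.mem_cons.mp hr with hr' | hr'
          · subst hr'; simp at hr1; omega
          · have := hpw.1 r hr'; omega
        rw [hcw]
        simp
      · have h3 : ¬ (p.1 = w) := by
          rcases List.mem_cons.mp hp with hp' | hp'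
          · subst hp'; omega
          · have := hpw.1 p hp'; omega
        simp [h3, hfl p hp]

-- how `contains` changes across A's conditional delta-set update
lemma contains_delta_update (st2 : PySem.Set Int) (w y : Int) (d : Bool) :
    PySem.Set.contains (if d then PySem.Set.add st2 w else st2) y
      = (PySem.Set.contains st2 y || (d && decide (y = w))) := by
  cases d with
  | false => simp
  | true =>
    simp only [if_true, Bool.true_and]
    by_cases hy : y = w <;> by_cases hm : y ∈ st2 <;>
      simp [PySem.Set.mem_add, hy, hm]

-- the simulation relation between B's association list and A's pair of sets
def pvRel (L : List (Int × Bool)) (st : PySem.Set Int × PySem.Set Int) : Prop :=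
  (L.map Prod.fst).Perm st.1 ∧ L.Pairwise (fun a b => b.1 < a.1) ∧
  (∀ p ∈ L, p.2 = PySem.Set.contains st.2 p.1) ∧
  (∀ z ∈ st.2, z ∈ st.1) ∧ st.1.Nodup ∧ st.2.Nodup

lemma pvRel_step (L : List (Int × Bool)) (st : PySem.Set Int × PySem.Set Int) (key : String)
    (h : pvRel L st) : pvRel (pvBStep L key) (pvAStep st key) := by
  obtain ⟨hperm, hpw, hfl, hsub, hnd1, hnd2⟩ := h
  rw [pvAStep_eq, pvBStep_eq]
  cases hp : pvParse? key with
  | none => exact ⟨hperm, hpw, hfl, hsub, hnd1, hnd2⟩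
  | some v =>
    obtain ⟨w, d⟩ := v
    change pvRel (pvInsertRecord L w d)
      (PySem.Set.add st.1 w, if d then PySem.Set.add st.2 w else st.2)
    have hfresh : w ∉ L.map Prod.fst → PySem.Set.contains st.2 w = false := by
      intro hnm
      rw [← Bool.not_eq_true, PySem.Set.contains_iff]
      intro hw2
      exact hnm (hperm.mem_iff.mpr (hsub w hw2))
    refine ⟨?_, pairwise_insert L w d hpw, ?_, ?_, PySem.Set.nodup_add _ _ hnd1, ?_⟩
    · by_cases hw : w ∈ L.map Prod.fst
      · have hw1 : w ∈ st.1 := hperm.mem_iff.mp hw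
        have hc : PySem.Set.contains st.1 w = true := (PySem.Set.contains_iff _ _).mpr hw1
        have : PySem.Set.add st.1 w = st.1 := by simp only [PySem.Set.add, hc, if_true]
        rw [fst_insert_of_mem L w d hpw hw, this]
        exact hperm
      · have hw1 : w ∉ st.1 := fun h => hw (hperm.mem_iff.mpr h)
        have hc : PySem.Set.contains st.1 w = false := by
          rw [← Bool.not_eq_true, PySem.Set.contains_iff]; exact hw1
        have hadd : PySem.Set.add st.1 w = st.1 ++ [w] := by
          simp only [PySem.Set.add, hc, Bool.false_eq_true, if_false]
        rw [hadd]
        exact ((fst_insert_of_not_mem L w d hw).trans (hperm.cons w)).trans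
          (List.perm_append_singleton w st.1).symm
    · intro p hp'
      rw [contains_delta_update]
      exact flag_insert L w d st.2 hpw hfresh hfl p hp'
    · intro z hz
      cases d with
      | false =>
        simp only [Bool.false_eq_true, if_false] at hz
        exact (PySem.Set.mem_add _ _ _).mpr (Or.inl (hsub z hz))
      | true =>
        simp only [if_true] at hz
        rcases (PySem.Set.mem_add _ _ _).mp hz with h | h
        · exact (PySem.Set.mem_add _ _ _).mpr (Or.inl (hsub z h))
        · exact (PySem.Set.mem_add _ _ _).mpr (Or.inr h)
    · cases d with
      | false => simpa using hnd2
      | true => simpa using PySem.Set.nodup_add _ _ hnd2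

lemma pvRel_fold (keys : List String) (L : List (Int × Bool)) (st : PySem.Set Int × PySem.Set Int)
    (h : pvRel L st) : pvRel (keys.foldl pvBStep L) (keys.foldl pvAStep st) := by
  induction keys generalizing L st with
  | nil => exact h
  | cons k ks ih => exact ih _ _ (pvRel_step L st k h)

-- a descending sort of any list sharing the elements of 'xs.filter p'
-- equals the filter of the descending sort of xs (xs duplicate-free)
lemma pv_sortedRev_filter (xs ts : List Int) (p : Int → Bool)
    (hnd : xs.Nodup) (hperm : (xs.filter p).Perm ts) :
    PySem.List.sorted ts (fun x => x) true =
      (PySem.List.sorted xs (fun x => x) true).filter p := by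
  apply PySem.List.sorted_rev_eq_of_perm_of_pairwise_gt
  · exact ((PySem.List.sorted_perm xs (fun x => x) true).filter p).trans hperm
  · have hpw : (PySem.List.sorted xs (fun x => x) true).Pairwise (fun a b => (b : Int) ≤ a) :=
      PySem.List.sorted_pairwise_rev xs (fun x => x)
    have hnd' : (PySem.List.sorted xs (fun x => x) true).Nodup :=
      (PySem.List.sorted_perm xs (fun x => x) true).nodup_iff.mpr hnd
    have : (PySem.List.sorted xs (fun x => x) true).Pairwise (fun a b => (b : Int) < a) := by
      refine List.Pairwise.imp₂ ?_ hpw hnd'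
      intro a b hle hne
      exact lt_of_le_of_ne hle (Ne.symm hne)
    exact this.filter p

-- ===== VERDICT =====
theorem parse_checkpoint_inventory_py_spec : Claim_equal_parse_checkpoint_inventory_py := by
  intro keys _
  unfold Spec_parse_checkpoint_inventory_py parse_checkpoint_inventory_py parse_checkpoint_inventory_py_alt
  have hlam : (fun (inv : List (Int × Bool)) (key : String) =>
      let parts := (PySem.Str.split? key "/").getD []
      if parts.length < 3 || !PySem.Str.startswith ((PySem.List.pyGet? parts 2).getD "") "checkpoint-" then inv
      else
        match PySem.List.pyGet? ((PySem.Str.splitMax? ((PySem.List.pyGet? parts 2).getD "") "-" 1).getD []) 1 with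
        | none => inv
        | some numStr =>
          match PySem.Int.ofStr? numStr with
          | none => inv
          | some window =>
            pvInsertRecord inv window
              (4 ≤ parts.length && decide (((PySem.List.pyGet? parts 3).getD "") = "DELTA"))) = pvBStep := rfl
  rw [hlam]
  obtain ⟨hperm, hpw, hfl, hsub, hnd1, hnd2⟩ :=
    pvRel_fold keys [] (PySem.Set.empty, PySem.Set.empty)
      ⟨List.Perm.refl _, List.Pairwise.nil, by simp, by simp [PySem.Set.empty], List.nodup_nil, List.nodup_nil⟩
  set L := keys.foldl pvBStep [] with hL
  set st := keys.foldl pvAStep (PySem.Set.empty, PySem.Set.empty) with hst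
  have hfstpw : (L.map Prod.fst).Pairwise (fun a b => (b : Int) < a) := hpw.map _ (fun _ _ h => h)
  have hall : PySem.List.sorted st.1 (fun x => x) true = L.map Prod.fst := by
    apply PySem.List.sorted_rev_eq_of_perm_of_pairwise_gt
    · exact hperm
    · exact hfstpw
  refine Prod.ext ?_ (Prod.ext ?_ ?_)
  · show PySem.List.sorted st.1 (fun x => x) true = L.map Prod.fst
    exact hall
  · -- full: sorted(all - delta) = fsts of records with flag false
    show PySem.List.sorted (PySem.Set.diff st.1 st.2) (fun x => x) true = _
    have hdiff : PySem.Set.diff st.1 st.2 = st.1.filter (fun x => !PySem.Set.contains st.2 x) := rfl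
    rw [hdiff, pv_sortedRev_filter st.1 _ _ hnd1 (List.Perm.refl _), hall, List.filter_map]
    show _ = (L.filter (fun p => !p.2)).map Prod.fst
    congr 1
    apply List.filter_congr
    intro p hp
    simp [Function.comp, hfl p hp]
  · -- delta: sorted(delta) = fsts of records with flag true
    show PySem.List.sorted st.2 (fun x => x) true = _
    have hperm2 : (st.1.filter (fun x => PySem.Set.contains st.2 x)).Perm st.2 := by
      rw [List.perm_ext_iff_of_nodup (hnd1.filter _) hnd2]
      intro x
      simp only [List.mem_filter, PySem.Set.contains_iff]
      exact ⟨fun h => h.2, fun h => ⟨hsub x h, h⟩⟩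
    rw [pv_sortedRev_filter st.1 st.2 _ hnd1 hperm2, hall, List.filter_map]
    show _ = (L.filter (fun p => p.2)).map Prod.fst
    congr 1
    apply List.filter_congr
    intro p hp
    simp [Function.comp, hfl p hp]
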